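-- pv_equiv track=rewrite | github.com/apetri/GoogleJam | src/RockPaperScissors/rps.py | construct_lineup
-- ===== SOURCE A (Python) =====
-- wins_over = dict([("R","S"),("P","R"),("S","P")])
--
-- def construct_lineup(N,start,count):
--
-- 	#Base case, there's only 1 player
-- 	if N==0:
-- 		return start
--
-- 	#Must win again this candidate
-- 	candidate = wins_over[start]
-- 	count[candidate] += 1
--
-- 	#Merge
-- 	left = construct_lineup(N-1,start,count)
-- 	right = construct_lineup(N-1,candidate,count)
-- 	if left<right:
-- 		return left + right
-- 	else:
-- 		return right + left
-- ===== SOURCE B (Python) =====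
-- wins_over = dict([("R","S"),("P","R"),("S","P")])
--
-- def construct_lineup(N, start, count):
-- 	# Pass 1: expand to the leaf sequence of the lineup tree, doing the
-- 	# same count increments (one per expansion, addition is order-free).
-- 	parts = [start]
-- 	for _ in range(N):
-- 		nxt = []
-- 		for s in parts:
-- 			c = wins_over[s]
-- 			count[c] += 1
-- 			nxt.append(s)
-- 			nxt.append(c)
-- 		parts = nxt
-- 	# Pass 2: merge adjacent pairs bottom-up until one string remains.
-- 	while len(parts) > 1:
-- 		parts = [a + b if a < b else b + a
-- 		         for a, b in zip(parts[::2], parts[1::2])]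
-- 	return parts[0]
-- ===== Notes on version B (the rewrite author's own statement) =====
-- stated objective: alternative
-- what changed: Replaces A's divide-and-conquer recursion by two explicit iterative passes: expand the start player into the leaf lineup level by level (doing the same count increments), then merge adjacent pairs bottom-up with min-concatenation until one string remains.
import Mathlib
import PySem

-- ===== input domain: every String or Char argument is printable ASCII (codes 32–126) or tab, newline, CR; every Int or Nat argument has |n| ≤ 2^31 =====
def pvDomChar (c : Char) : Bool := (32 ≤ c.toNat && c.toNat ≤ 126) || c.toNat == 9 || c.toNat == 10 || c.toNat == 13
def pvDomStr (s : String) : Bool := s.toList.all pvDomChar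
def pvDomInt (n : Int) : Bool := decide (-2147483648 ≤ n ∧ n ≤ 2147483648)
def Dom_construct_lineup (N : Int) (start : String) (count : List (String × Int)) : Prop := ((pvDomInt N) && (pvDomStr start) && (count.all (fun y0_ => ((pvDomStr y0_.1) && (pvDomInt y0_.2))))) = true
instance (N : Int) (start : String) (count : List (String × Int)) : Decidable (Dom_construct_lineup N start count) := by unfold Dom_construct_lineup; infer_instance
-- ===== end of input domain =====

-- B replaces A's divide-and-conquer recursion by two iterative passes (expand to leaves,
-- then merge adjacent pairs bottom-up); equivalence is about the RETURN value — both
-- Pythons mutate `count` in place with the same total increments per key.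

-- ===== PORT A =====
-- shared module-level constant: wins_over lookup; Python raises KeyError for a key
-- outside {"R","P","S"} — those inputs are excluded by Pre_, here .getD "".
def wo (s : String) : String :=
  (PySem.Dict.get? (PySem.Dict.ofList [("R","S"),("P","R"),("S","P")]) s).getD ""

-- the recursion of A, on fuel N.toNat (Pre_ requires 0 ≤ N; Python recurses on N-1),
-- threading the mutated dict `count` through in Python's evaluation order.
def goA : Nat → String → PySem.Dict String Int → String × PySem.Dict String Int
  | 0, start, cnt => (start, cnt)
  | Nat.succ n, start, cnt =>
      let candidate := wo start
      let cnt1 := cnt.modify candidate 0 (· + 1)  -- count[candidate] += 1 (key present under Pre_)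
      let l := goA n start cnt1
      let r := goA n candidate l.2
      if l.1 < r.1 then (l.1 ++ r.1, r.2) else (r.1 ++ l.1, r.2)

def construct_lineup (N : Int) (start : String) (count : List (String × Int)) : String :=
  (goA N.toNat start (PySem.Dict.ofList count)).1

-- ===== PORT B =====
-- one round of the expansion loop body: each s contributes s then wins_over[s]
def expandStep (xs : List String) : List String := xs.flatMap (fun s => [s, wo s])

-- `for _ in range(N): parts = expand(parts)` (count increments are a side effect
-- on `count` only and never reach the return value, so they are not threaded here)
def exRounds : Nat → List String → List String
  | 0, xs => xs
  | Nat.succ n, xs => exRounds n (expandStep xs)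

-- `[a+b if a<b else b+a for a,b in zip(parts[::2], parts[1::2])]` (zip drops an odd tail)
def mergePairs : List String → List String
  | a :: b :: rest => (if a < b then a ++ b else b ++ a) :: mergePairs rest
  | _ => []

theorem mergePairs_length (ys : List String) : (mergePairs ys).length = ys.length / 2 := by
  match ys with
  | a :: b :: rest => simp [mergePairs, mergePairs_length rest]; omega
  | [] => simp [mergePairs]
  | [a] => simp [mergePairs]

-- `while len(parts) > 1: parts = mergePairs(parts)`
def mergeAll (ys : List String) : List String :=
  if _h : 2 ≤ ys.length then mergeAll (mergePairs ys) else ys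
termination_by ys.length
decreasing_by simp [mergePairs_length]; omega

def construct_lineup_alt (N : Int) (start : String) (_count : List (String × Int)) : String :=
  -- return parts[0]: the list is provably nonempty here, so IndexError is unreachable
  (mergeAll (exRounds N.toNat [start])).headD ""

-- ===== PRECONDITION & SPEC =====
-- Pre_ is exactly where the Python A returns: N ≥ 0 (on negative N, A recurses without
-- bound and raises; B would return start there),
-- for N ≥ 1 start must be a key of wins_over and every key A increments must be present
-- in count (else KeyError): N=1 only wins_over[start], N=2 also its successor, N≥3 all
-- three; N=0 returns start untouched, so any start and count are accepted there.
def neededKeys (N : Int) (start : String) : List String :=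
  if N ≤ 0 then []
  else if N = 1 then [wo start]
  else if N = 2 then [wo start, wo (wo start)]
  else ["R", "P", "S"]

def Pre_construct_lineup (N : Int) (start : String) (count : List (String × Int)) : Prop :=
  0 ≤ N ∧ (N = 0 ∨ start ∈ (["R", "P", "S"] : List String)) ∧
    ∀ k ∈ neededKeys N start, k ∈ count.map Prod.fst

instance (N : Int) (start : String) (count : List (String × Int)) : Decidable (Pre_construct_lineup N start count) := by
  unfold Pre_construct_lineup; infer_instance

def pvWitness_construct_lineup : Int × String × (List (String × Int)) :=
  (3, "R", [("R", 0), ("P", 0), ("S", 0)])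

def Spec_construct_lineup (N : Int) (start : String) (count : List (String × Int)) (out : String) : Prop := out = construct_lineup_alt N start count
instance (N : Int) (start : String) (count : List (String × Int)) (out : String) : Decidable (Spec_construct_lineup N start count out) := by unfold Spec_construct_lineup; infer_instance

-- ===== CLAIM (what is proved, stated in full; the proofs are below) =====
def Claim_equal_construct_lineup : Prop := ∀ (N : Int) (start : String) (count : List (String × Int)), Dom_construct_lineup N start count → Pre_construct_lineup N start count → Spec_construct_lineup N start count (construct_lineup N start count)

-- ===== LEMMAS AND PROOFS =====

-- the pure tree value: leaves labelled g, internal nodes the min-concatenation merge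
def ftree : Nat → (String → String) → String → String
  | 0, g, s => g s
  | Nat.succ n, g, s =>
      let l := ftree n g s
      let r := ftree n g (wo s)
      if l < r then l ++ r else r ++ l

-- the leaf sequence of the tree rooted at s with n expansion rounds
def leaves : Nat → String → List String
  | 0, s => [s]
  | Nat.succ n, s => leaves n s ++ leaves n (wo s)

theorem goA_fst (n : Nat) : ∀ (s : String) (cnt : PySem.Dict String Int),
    (goA n s cnt).1 = ftree n id s := by
  induction n with
  | zero => intro s cnt; simp [goA, ftree]
  | succ n ih =>
      intro s cnt
      simp only [goA, ftree, ih]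
      split <;> rfl

theorem leaves_succ_E (n : Nat) : ∀ s, leaves (n + 1) s = expandStep (leaves n s) := by
  induction n with
  | zero => intro s; simp [leaves, expandStep]
  | succ n ih =>
      intro s
      calc leaves (n + 1 + 1) s = leaves (n + 1) s ++ leaves (n + 1) (wo s) := rfl
        _ = expandStep (leaves n s) ++ expandStep (leaves n (wo s)) := by rw [ih, ih]
        _ = expandStep (leaves n s ++ leaves n (wo s)) := by simp [expandStep]
        _ = expandStep (leaves (n + 1) s) := rfl

theorem exRounds_eq (n : Nat) : ∀ xs, exRounds n xs = xs.flatMap (leaves n) := by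
  induction n with
  | zero => intro xs; simp [exRounds, leaves]
  | succ n ih =>
      intro xs
      show exRounds n (expandStep xs) = _
      rw [ih]
      simp only [expandStep, List.flatMap_assoc]
      congr 1
      funext s
      simp [leaves]

theorem leaves_length (n : Nat) (s : String) : (leaves n s).length = 2 ^ n := by
  induction n generalizing s with
  | zero => simp [leaves]
  | succ n ih => simp [leaves, ih, pow_succ]; ring

theorem mergePairs_E_map (ys : List String) (g : String → String) :
    mergePairs ((expandStep ys).map g)
      = ys.map (fun t => if g t < g (wo t) then g t ++ g (wo t) else g (wo t) ++ g t) := by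
  induction ys with
  | nil => simp [expandStep, mergePairs]
  | cons t ys ih => simp [expandStep, mergePairs] at ih ⊢; exact ih

theorem ftree_shift (n : Nat) : ∀ (g : String → String) (s : String),
    ftree n (fun t => if g t < g (wo t) then g t ++ g (wo t) else g (wo t) ++ g t) s
      = ftree (n + 1) g s := by
  induction n with
  | zero => intro g s; rfl
  | succ n ih =>
      intro g s
      show (let l := ftree n _ s; let r := ftree n _ (wo s);
            if l < r then l ++ r else r ++ l) = _
      simp only [ih g s, ih g (wo s)]
      rfl

theorem mergeAll_leaves (n : Nat) : ∀ (g : String → String) (s : String),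
    mergeAll ((leaves n s).map g) = [ftree n g s] := by
  induction n with
  | zero => intro g s; rw [mergeAll]; simp [leaves, ftree]
  | succ n ih =>
      intro g s
      rw [mergeAll]
      have hlen : 2 ≤ ((leaves (n + 1) s).map g).length := by
        rw [List.length_map, leaves_length]
        calc 2 = 2 ^ 1 := rfl
        _ ≤ 2 ^ (n + 1) := Nat.pow_le_pow_right (by norm_num) (by omega)
      rw [dif_pos hlen, leaves_succ_E, mergePairs_E_map, ih, ftree_shift]

-- ===== VERDICT (by name: the statement is the Claim_ definition above) =====
theorem construct_lineup_spec : Claim_equal_construct_lineup := by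
  intro N start count _ _
  unfold Spec_construct_lineup construct_lineup construct_lineup_alt
  rw [goA_fst, exRounds_eq]
  have h : ([start].flatMap (leaves N.toNat)) = (leaves N.toNat start).map id := by simp
  rw [h, mergeAll_leaves]
  rfl
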